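-- pv_equiv track=rewrite | github.com/raphael-group/LAML-Pro-experiments | real_data/preprocess/nexus_to_newick.py | strip_bracket_comments
-- ===== SOURCE A (Python) =====
-- def strip_bracket_comments(s: str) -> str:
--     out = []
--     i, n = 0, len(s)
--     in_sq = False  # inside single-quoted label
--     while i < n:
--         c = s[i]
--         if in_sq:
--             out.append(c)
--             # handle escaped '' inside quotes
--             if c == "'":
--                 if i + 1 < n and s[i + 1] == "'":
--                     out.append("'")
--                     i += 2
--                     continue
--                 in_sq = False
--             i += 1
--             continue
--         # not in quotes: start of comment?
--         if c == '[':
--             # skip until the next ']' (non-nesting per Newick/Nexus comments)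
--             j = s.find(']', i + 1)
--             if j == -1:
--                 break  # malformed; drop remainder
--             i = j + 1
--             continue
--         if c == "'":
--             in_sq = True
--             out.append(c)
--             i += 1
--             continue
--         out.append(c)
--         i += 1
--     return ''.join(out)
-- ===== SOURCE B (Python) =====
-- def strip_bracket_comments(s: str) -> str:
--     # Single pass state machine: 0=normal, 1=in quote, 2=just saw quote while quoted, 3=in comment
--     out = []
--     state = 0
--     for c in s:
--         if state == 3:
--             if c == ']':
--                 state = 0
--         elif state == 2:
--             if c == "'":
--                 out.append(c)
--                 state = 1
--             elif c == '[':
--                 state = 3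
--             else:
--                 out.append(c)
--                 state = 0
--         elif state == 1:
--             out.append(c)
--             if c == "'":
--                 state = 2
--         elif c == '[':
--             state = 3
--         else:
--             out.append(c)
--             if c == "'":
--                 state = 1
--     return ''.join(out)
-- ===== Notes on version B (the rewrite author's own statement) =====
-- stated objective: faster
-- what changed: Replaced A's index-driven while loop that calls str.find to jump past each comment and peeks one character ahead for escaped quotes with a single for-loop over the characters driven by a four-state machine (normal / in-quote / quote-just-seen / in-comment) with no indexing or lookahead.
import Mathlib
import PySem

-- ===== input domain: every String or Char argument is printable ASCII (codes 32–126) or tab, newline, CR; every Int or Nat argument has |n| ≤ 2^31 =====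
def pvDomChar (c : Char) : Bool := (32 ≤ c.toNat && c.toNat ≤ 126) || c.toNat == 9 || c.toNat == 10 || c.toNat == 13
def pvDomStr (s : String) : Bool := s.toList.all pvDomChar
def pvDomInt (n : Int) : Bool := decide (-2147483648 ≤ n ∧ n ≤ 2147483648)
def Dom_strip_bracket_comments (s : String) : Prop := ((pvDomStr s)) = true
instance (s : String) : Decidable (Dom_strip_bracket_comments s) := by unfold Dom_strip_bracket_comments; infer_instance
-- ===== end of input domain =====

-- B replaces A's index/find-based comment skipping with a four-state per-character
-- state machine (objective: alternative decomposition, same behaviour and cost).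

-- ===== PORT A =====

-- s.find(']', i+1) restated on the suffix after position i: drop everything up to
-- and including the first ']'; none exactly when Python's find returns -1 (then A breaks).
def pvFindSkipA : List Char → Option (List Char)
  | [] => none
  | c :: r => if c = ']' then some r else pvFindSkipA r

theorem pvFindSkipA_length : ∀ (l r : List Char), pvFindSkipA l = some r → r.length < l.length := by
  intro l
  induction l with
  | nil => intro r h; simp [pvFindSkipA] at h
  | cons c t ih =>
    intro r h
    simp only [pvFindSkipA] at h
    split at h
    · cases h; simp
    · exact Nat.lt_trans (ih r h) (by simp)

-- A's while loop: the suffix s[i:] stands for the index i, in_sq is A's boolean;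
-- 's[i+1] == "'"', then 'i += 2' becomes the head?/tail test on the suffix.
def pvGoA : List Char → Bool → List Char
  | [], _ => []
  | c :: rest, in_sq =>
    if in_sq then
      if c = '\'' then
        if rest.head? = some '\'' then c :: '\'' :: pvGoA rest.tail true
        else c :: pvGoA rest false
      else c :: pvGoA rest true
    else if c = '[' then
      match h : pvFindSkipA rest with
      | some rest' => pvGoA rest' false
      | none => []
    else if c = '\'' then c :: pvGoA rest true
    else c :: pvGoA rest false
termination_by l _ => l.length
decreasing_by
  all_goals first
    | (simp [List.length_tail]; omega)
    | exact Nat.lt_trans (pvFindSkipA_length _ _ h) (by simp)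
    | simp

def strip_bracket_comments (s : String) : String :=
  String.ofList (pvGoA s.toList false)

-- ===== PORT B =====

-- B's for-loop body: states 0=normal, 1=in quote, 2=just saw quote while quoted, 3=in comment.
def pvStepB (acc : List Char × Nat) (c : Char) : List Char × Nat :=
  let out := acc.1
  let st := acc.2
  if st = 3 then (if c = ']' then (out, 0) else (out, 3))
  else if st = 2 then
    (if c = '\'' then (out ++ [c], 1)
     else if c = '[' then (out, 3)
     else (out ++ [c], 0))
  else if st = 1 then ((out ++ [c]), if c = '\'' then 2 else 1)
  else if c = '[' then (out, 3)
  else (out ++ [c], if c = '\'' then 1 else 0)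

def strip_bracket_comments_alt (s : String) : String :=
  String.ofList (s.toList.foldl pvStepB ([], 0)).1

-- ===== PRECONDITION & SPEC =====
def Spec_strip_bracket_comments (s : String) (out : String) : Prop := out = strip_bracket_comments_alt s
instance (s : String) (out : String) : Decidable (Spec_strip_bracket_comments s out) := by unfold Spec_strip_bracket_comments; infer_instance

-- ===== CLAIM (what is proved, stated in full; the proofs are below) =====
def Claim_equal_strip_bracket_comments : Prop := ∀ (s : String), Dom_strip_bracket_comments s → Spec_strip_bracket_comments s (strip_bracket_comments s)

-- ===== LEMMAS AND PROOFS =====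

-- B's loop, recursively: the characters emitted from state st onward.
def pvEmitB (st : Nat) : List Char → List Char
  | [] => []
  | c :: r =>
    if st = 3 then (if c = ']' then pvEmitB 0 r else pvEmitB 3 r)
    else if st = 2 then
      (if c = '\'' then c :: pvEmitB 1 r
       else if c = '[' then pvEmitB 3 r
       else c :: pvEmitB 0 r)
    else if st = 1 then c :: (if c = '\'' then pvEmitB 2 r else pvEmitB 1 r)
    else if c = '[' then pvEmitB 3 r
    else c :: (if c = '\'' then pvEmitB 1 r else pvEmitB 0 r)

theorem pvFoldB_eq_emit : ∀ (l : List Char) (out : List Char) (st : Nat),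
    (l.foldl pvStepB (out, st)).1 = out ++ pvEmitB st l := by
  intro l
  induction l with
  | nil => intro out st; simp [pvEmitB]
  | cons c r ih =>
    intro out st
    simp only [List.foldl_cons, pvStepB, pvEmitB]
    by_cases h3 : st = 3 <;> by_cases h2 : st = 2 <;> by_cases h1 : st = 1 <;>
      simp [h3, h2, h1] <;> split_ifs <;> simp [ih]

-- B's comment state 3 does exactly A's find-and-skip.
theorem pvEmitB_three : ∀ (l : List Char),
    pvEmitB 3 l = (match pvFindSkipA l with | some r => pvEmitB 0 r | none => []) := by
  intro l
  induction l with
  | nil => simp [pvEmitB, pvFindSkipA]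
  | cons c r ih =>
    simp only [pvEmitB, pvFindSkipA]
    by_cases h : c = ']' <;> simp [h, ih]

-- Main correspondence: B's state 0 is A with in_sq = false, state 1 is in_sq = true.
theorem pvEmitB_eq_goA : ∀ (n : Nat) (l : List Char), l.length ≤ n →
    pvEmitB 0 l = pvGoA l false ∧ pvEmitB 1 l = pvGoA l true := by
  intro n
  induction n with
  | zero =>
    intro l hl
    have : l = [] := List.eq_nil_of_length_eq_zero (Nat.le_zero.mp hl)
    subst this
    simp [pvEmitB, pvGoA]
  | succ n ih =>
    intro l hl
    cases l with
    | nil => simp [pvEmitB, pvGoA]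
    | cons c r =>
      have hr : r.length ≤ n := by simpa using hl
      constructor
      · -- state 0 vs in_sq = false
        simp only [pvEmitB, pvGoA]
        by_cases hb : c = '['
        · simp only [hb, reduceCtorEq, if_false, if_true]
          rw [pvEmitB_three]
          cases hfs : pvFindSkipA r with
          | none => simp
          | some r' =>
            have hrl : r'.length ≤ n := Nat.le_trans (Nat.le_of_lt (pvFindSkipA_length _ _ hfs)) hr
            simp [(ih r' hrl).1]
        · by_cases hq : c = '\''
          · simp [hq, (ih r hr).2]
          · simp [hb, hq, (ih r hr).1]
      · -- state 1 vs in_sq = true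
        simp only [pvEmitB, pvGoA]
        by_cases hq : c = '\''
        · simp only [hq, if_true]
          -- B moves to state 2 (quote just seen); A looks one character ahead
          cases r with
          | nil => simp [pvEmitB, pvGoA]
          | cons d r2 =>
            have hr2 : r2.length ≤ n := by simp at hr; omega
            by_cases hd : d = '\''
            · subst hd
              simp [pvEmitB, (ih r2 hr2).2]
            · -- d ≠ '\'': A drops to in_sq = false on d :: r2; B's state 2 acts as state 0
              have h0 : pvEmitB 0 (d :: r2) = pvGoA (d :: r2) false := (ih (d :: r2) hr).1
              have h2 : pvEmitB 2 (d :: r2) = pvEmitB 0 (d :: r2) := by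
                simp [pvEmitB, hd]
              simp [hd, h2, h0]
        · simp [hq, (ih r hr).2]

-- ===== VERDICT (by name: the statement is the Claim_ definition above) =====
theorem strip_bracket_comments_spec : Claim_equal_strip_bracket_comments := by
  intro s _
  unfold Spec_strip_bracket_comments strip_bracket_comments strip_bracket_comments_alt
  rw [pvFoldB_eq_emit, (pvEmitB_eq_goA s.toList.length s.toList (le_refl _)).1]
  simp
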